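-- pv_equiv track=rewrite | github.com/TrevorGlove/motor_control | FuzzyLib.py | Combination_values
-- ===== SOURCE A (Python) =====
-- def Combination_values(values):
--     min_values = []
--
--     def combine_lists(values, current_combination, index):
--         if index == len(values):
--             min_value = min(current_combination)
--             min_values.append(min_value)
--         else:
--             for item in values[index]:
--                 combine_lists(values, current_combination + [item], index + 1)
--
--     combine_lists(values, [], 0)
--     return min_values
-- ===== SOURCE B (Python) =====
-- def Combination_values(values):
--     # Iterative left fold: carry the running minimum of every partial
--     # combination instead of rebuilding each combination list and
--     # re-computing min over it.
--     acc = list(values[0])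
--     for lst in values[1:]:
--         acc = [min(m, x) for m in acc for x in lst]
--     return acc
-- ===== Notes on version B (the rewrite author's own statement) =====
-- stated objective: alternative
-- what changed: Replaces the recursive enumeration that rebuilds each combination list and re-computes min over it with an iterative left fold that carries only the running minimum of every partial combination.
-- outside the precondition, e.g. on Combination_values([]): A raises ValueError, B raises IndexError
import Mathlib
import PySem

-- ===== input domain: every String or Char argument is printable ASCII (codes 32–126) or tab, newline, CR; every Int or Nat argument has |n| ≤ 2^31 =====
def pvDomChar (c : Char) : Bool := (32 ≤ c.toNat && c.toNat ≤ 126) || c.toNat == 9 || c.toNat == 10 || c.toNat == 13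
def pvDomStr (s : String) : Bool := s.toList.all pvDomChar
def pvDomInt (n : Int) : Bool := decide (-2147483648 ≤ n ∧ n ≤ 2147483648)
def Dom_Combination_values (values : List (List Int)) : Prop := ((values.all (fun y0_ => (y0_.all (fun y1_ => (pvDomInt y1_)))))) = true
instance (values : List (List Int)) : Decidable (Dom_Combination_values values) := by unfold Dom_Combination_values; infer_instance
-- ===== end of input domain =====

-- B replaces A's recursive rebuild-and-re-min enumeration with a left fold carrying running minima.

-- ===== PORT A =====
-- combine_lists: recursion over the remaining lists (Python's index into values),
-- the partial combination is built by list concatenation and min is re-computed at the leaf.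
-- min([]) raising (values = []) is excluded by Pre_; getD 0 is never reached there.
def pvA_go (rest : List (List Int)) (cur : List Int) : List Int :=
  match rest with
  | [] => [(PySem.List.min? cur (fun y => y)).getD 0]
  | l :: ls => l.flatMap (fun item => pvA_go ls (cur ++ [item]))

def Combination_values (values : List (List Int)) : List Int :=
  pvA_go values []

-- ===== PORT B =====
def Combination_values_alt (values : List (List Int)) : List Int :=
  match values with
  | [] => []  -- Source B raises IndexError here; outside Pre_
  | v :: rest => rest.foldl (fun acc lst => acc.flatMap (fun m => lst.map (fun x => min m x))) v

-- ===== PRECONDITION & SPEC =====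
-- Pre_ excludes only values = [], on which A raises ValueError (min of empty sequence).
def Pre_Combination_values (values : List (List Int)) : Prop := values ≠ []
instance (values : List (List Int)) : Decidable (Pre_Combination_values values) := by unfold Pre_Combination_values; infer_instance
def pvWitness_Combination_values : List (List Int) := [[3, 1], [2]]
def Spec_Combination_values (values : List (List Int)) (out : List Int) : Prop := out = Combination_values_alt values
instance (values : List (List Int)) (out : List Int) : Decidable (Spec_Combination_values values out) := by unfold Spec_Combination_values; infer_instance

-- ===== CLAIM (what is proved, stated in full; the proofs are below) =====
def Claim_equal_Combination_values : Prop := ∀ (values : List (List Int)), Dom_Combination_values values → Pre_Combination_values values → Spec_Combination_values values (Combination_values values)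

-- ===== LEMMAS AND PROOFS =====

-- running-minimum view of A's recursion
def pvG (rest : List (List Int)) (c : Int) : List Int :=
  match rest with
  | [] => [c]
  | l :: ls => l.flatMap (fun x => pvG ls (min c x))

def pvStep (acc : List Int) (lst : List Int) : List Int :=
  acc.flatMap (fun m => lst.map (fun x => min m x))

lemma min?_append_singleton (cur : List Int) (c x : Int)
    (h : PySem.List.min? cur (fun y => y) = some c) :
    PySem.List.min? (cur ++ [x]) (fun y => y) = some (min c x) := by
  cases cur with
  | nil => simp [PySem.List.min?] at h
  | cons a t =>
    rw [PySem.List.min?_id_cons] at h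
    have : a :: t ++ [x] = a :: (t ++ [x]) := rfl
    rw [this, PySem.List.min?_id_cons, List.foldl_append]
    simp_all

lemma pvA_go_eq_pvG (rest : List (List Int)) (cur : List Int) (c : Int)
    (h : PySem.List.min? cur (fun y => y) = some c) :
    pvA_go rest cur = pvG rest c := by
  induction rest generalizing cur c with
  | nil => simp [pvA_go, pvG, h]
  | cons l ls ih =>
    simp only [pvA_go, pvG]
    exact List.flatMap_congr (fun x _ => ih (cur ++ [x]) (min c x) (min?_append_singleton cur c x h))

lemma foldl_step_flatMap (ls : List (List Int)) (acc : List Int) :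
    ls.foldl pvStep acc = acc.flatMap (fun x => ls.foldl pvStep [x]) := by
  induction ls generalizing acc with
  | nil => simp
  | cons l t ih =>
    simp only [List.foldl_cons]
    rw [ih (pvStep acc l)]
    refine Eq.trans ?_ (List.flatMap_congr (fun x _ => (ih (pvStep [x] l)).symm))
    simp [pvStep, List.flatMap_assoc, List.flatMap_map]

lemma pvG_eq_foldl (rest : List (List Int)) (c : Int) :
    pvG rest c = rest.foldl pvStep [c] := by
  induction rest generalizing c with
  | nil => simp [pvG]
  | cons l ls ih =>
    simp only [pvG, List.foldl_cons]
    rw [foldl_step_flatMap ls (pvStep [c] l)]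
    have hstep : pvStep [c] l = l.map (fun x => min c x) := by simp [pvStep]
    rw [hstep, List.flatMap_map]
    exact List.flatMap_congr (fun x _ => ih (min c x))

-- ===== VERDICT (by name: the statement is the Claim_ definition above) =====
theorem Combination_values_spec : Claim_equal_Combination_values := by
  intro values _ hpre
  cases values with
  | nil => exact absurd rfl hpre
  | cons v rest =>
    show Combination_values (v :: rest) = Combination_values_alt (v :: rest)
    simp only [Combination_values, Combination_values_alt, pvA_go, List.nil_append]
    have h1 : ∀ x : Int, pvA_go rest [x] = pvG rest x := fun x =>
      pvA_go_eq_pvG rest [x] x (by rw [PySem.List.min?_id_cons]; rfl)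
    calc v.flatMap (fun item => pvA_go rest [item])
        = v.flatMap (fun x => rest.foldl pvStep [x]) :=
          List.flatMap_congr (fun x _ => (h1 x).trans (pvG_eq_foldl rest x))
      _ = rest.foldl pvStep v := (foldl_step_flatMap rest v).symm
      _ = rest.foldl (fun acc lst => acc.flatMap (fun m => lst.map (fun x => min m x))) v := rfl
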